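-- pv_equiv track=rewrite | github.com/hzeemr/crimsonforge | core/asset_catalog.py | _extract_item_family_codes
-- ===== SOURCE A (Python) =====
-- def _extract_item_family_codes(paths: list[str], known_codes: list[str]) -> list[str]:
--     matches: list[str] = []
--     seen: set[str] = set()
--     for code in known_codes:
--         marker = f"_{code.lower()}_"
--         for path in paths:
--             if marker in path.lower():
--                 if code not in seen:
--                     seen.add(code)
--                     matches.append(code)
--                 break
--     return matches
-- ===== SOURCE B (Python) =====
-- def _extract_item_family_codes(paths: list[str], known_codes: list[str]) -> list[str]:
--     # Path-major scan: walk the paths once, accumulating the set of distinct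
--     # markers seen so far (skipping markers already found, stopping early once
--     # all are found), then emit the deduplicated codes whose marker was found.
--     markers = list(dict.fromkeys("_" + c.lower() + "_" for c in known_codes))
--     found: set[str] = set()
--     for path in paths:
--         if len(found) == len(markers):
--             break
--         pl = path.lower()
--         for m in markers:
--             if m not in found and m in pl:
--                 found.add(m)
--     return [c for c in dict.fromkeys(known_codes) if "_" + c.lower() + "_" in found]
-- ===== Notes on version B (the rewrite author's own statement) =====
-- stated objective: alternative
-- what changed: B inverts the loop nesting: instead of A's code-major scan (for each code, scan the paths with break and thread a seen-set), B makes one path-major pass that accumulates the set of distinct markers found so far (skipping already-found markers and breaking once all are found), then a second pass emits the deduplicated known_codes whose marker landed in that set.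
import Mathlib
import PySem

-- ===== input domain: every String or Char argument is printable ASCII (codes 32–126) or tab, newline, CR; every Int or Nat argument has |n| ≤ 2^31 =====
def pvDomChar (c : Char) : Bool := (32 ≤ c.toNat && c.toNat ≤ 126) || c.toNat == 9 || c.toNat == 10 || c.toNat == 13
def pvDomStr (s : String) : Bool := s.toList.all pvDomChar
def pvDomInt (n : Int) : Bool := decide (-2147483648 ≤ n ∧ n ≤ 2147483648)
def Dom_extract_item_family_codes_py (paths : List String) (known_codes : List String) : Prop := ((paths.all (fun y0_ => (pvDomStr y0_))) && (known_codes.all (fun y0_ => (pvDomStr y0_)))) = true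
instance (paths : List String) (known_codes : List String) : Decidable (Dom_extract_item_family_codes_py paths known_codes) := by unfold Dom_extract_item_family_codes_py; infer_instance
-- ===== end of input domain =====

-- B inverts the loops: one path-major pass accumulates the set of distinct markers
-- found so far (skipping found markers, breaking once all are found), then a second
-- pass emits the deduplicated codes whose marker is in that set (alternative decomposition).


-- ===== PORT A =====
-- inner 'for path in paths: if marker in path.lower(): … ; break' — true iff the loop breaks
def pvInnerLoopA (marker : String) : List String → Bool
  | [] => false
  | p :: rest => if PySem.Str.isIn marker (PySem.Str.lower p) then true else pvInnerLoopA marker rest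

def extract_item_family_codes_py (paths : List String) (known_codes : List String) : List String :=
  (known_codes.foldl
    (fun st code =>
      let marker := "_" ++ PySem.Str.lower code ++ "_"
      if pvInnerLoopA marker paths then
        if PySem.Set.contains st.2 code then st
        else (st.1 ++ [code], PySem.Set.add st.2 code)
      else st)
    (([] : List String), (PySem.Set.empty : PySem.Set String))).1

-- ===== PORT B =====
-- 'for m in markers: if m not in found and m in pl: found.add(m)'
def pvScanPathB (pl : String) (markers : List String) (found : PySem.Set String) : PySem.Set String :=
  markers.foldl (fun f m => if !PySem.Set.contains f m && PySem.Str.isIn m pl then PySem.Set.add f m else f) found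

-- 'for path in paths: if len(found) == len(markers): break; …'
def pvLoopB (markers : List String) : List String → PySem.Set String → PySem.Set String
  | [], found => found
  | p :: rest, found =>
      if found.length == markers.length then found
      else pvLoopB markers rest (pvScanPathB (PySem.Str.lower p) markers found)

def extract_item_family_codes_py_alt (paths : List String) (known_codes : List String) : List String :=
  let markers := PySem.List.dedup (known_codes.map (fun c => "_" ++ PySem.Str.lower c ++ "_"))
  let found := pvLoopB markers paths PySem.Set.empty
  (PySem.List.dedup known_codes).filter
    (fun c => PySem.Set.contains found ("_" ++ PySem.Str.lower c ++ "_"))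

-- ===== PRECONDITION & SPEC =====
def Spec_extract_item_family_codes_py (paths : List String) (known_codes : List String) (out : List String) : Prop := out = extract_item_family_codes_py_alt paths known_codes
instance (paths : List String) (known_codes : List String) (out : List String) : Decidable (Spec_extract_item_family_codes_py paths known_codes out) := by unfold Spec_extract_item_family_codes_py; infer_instance

-- ===== CLAIM (what is proved, stated in full; the proofs are below) =====
def Claim_equal_extract_item_family_codes_py : Prop := ∀ (paths : List String) (known_codes : List String), Dom_extract_item_family_codes_py paths known_codes → Spec_extract_item_family_codes_py paths known_codes (extract_item_family_codes_py paths known_codes)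

-- ===== LEMMAS AND PROOFS =====

-- A SIDE: A's result is the dedup of known_codes filtered by "marker occurs in some path".

-- the inner break-loop is an 'any' over paths
theorem pvInnerLoopA_eq_any (marker : String) (paths : List String) :
    pvInnerLoopA marker paths = paths.any (fun p => PySem.Str.isIn marker (PySem.Str.lower p)) := by
  induction paths with
  | nil => rfl
  | cons p rest ih => simp [pvInnerLoopA, ih]

-- one step of A's paired fold keeps (matches, seen) equal and is an add-if-hit step
theorem pvPairStep_eq (hit : String → Bool) (l : List String) (c : String) :
    (if hit c then
        if PySem.Set.contains (l : PySem.Set String) c then ((l, l) : List String × PySem.Set String)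
        else (l ++ [c], PySem.Set.add l c)
      else (l, l))
    = ((if hit c then PySem.Set.add l c else l), (if hit c then PySem.Set.add l c else l)) := by
  by_cases hc : hit c <;> by_cases hm : c ∈ l <;>
    simp [PySem.Set.add, PySem.Set.contains_eq_listContains, List.contains_eq_mem, hc, hm]

-- A's paired fold (matches, seen) equals the add-if-hit fold in both components
theorem pvPairFold_eq (hit : String → Bool) (ks : List String) (l : List String) :
    ks.foldl
      (fun st code =>
        if hit code then
          if PySem.Set.contains st.2 code then st
          else (st.1 ++ [code], PySem.Set.add st.2 code)
        else st)
      (l, l)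
    = (ks.foldl (fun s code => if hit code then PySem.Set.add s code else s) l,
       ks.foldl (fun s code => if hit code then PySem.Set.add s code else s) l) := by
  induction ks generalizing l with
  | nil => rfl
  | cons c rest ih =>
    simp only [List.foldl_cons, pvPairStep_eq hit l c]
    exact ih _

-- the add-if-hit fold is the plain Set fold over the filtered list
theorem pvFoldIf_eq_fold_filter (hit : String → Bool) (ks : List String) (l : List String) :
    ks.foldl (fun s code => if hit code then PySem.Set.add s code else s) l
    = (ks.filter hit).foldl PySem.Set.add l := by
  induction ks generalizing l with
  | nil => rfl
  | cons c rest ih =>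
    by_cases hc : hit c <;> simp [hc, ih]

-- Set.add-folding commutes with filter
theorem pvFold_add_filter (p : String → Bool) (ks : List String) (s : List String) :
    ((ks.foldl PySem.Set.add s).filter p) = (ks.filter p).foldl PySem.Set.add (s.filter p) := by
  induction ks generalizing s with
  | nil => rfl
  | cons c rest ih =>
    simp only [List.foldl_cons, List.filter_cons]
    rw [ih]
    by_cases hc : p c <;> by_cases hm : c ∈ s <;>
      simp [PySem.Set.add, PySem.Set.contains_eq_listContains, List.contains_eq_mem,
        List.mem_filter, List.filter_append, hc, hm]

theorem pvA_char (paths known_codes : List String) :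
    extract_item_family_codes_py paths known_codes
    = (PySem.List.dedup known_codes).filter
        (fun c => paths.any (fun p => PySem.Str.isIn ("_" ++ PySem.Str.lower c ++ "_") (PySem.Str.lower p))) := by
  unfold extract_item_family_codes_py
  dsimp only
  rw [show (PySem.Set.empty : PySem.Set String) = ([] : List String) from rfl]
  rw [pvPairFold_eq (fun code => pvInnerLoopA ("_" ++ PySem.Str.lower code ++ "_") paths)
       known_codes []]
  rw [pvFoldIf_eq_fold_filter, PySem.List.dedup_eq_ofList, PySem.Set.ofList_eq_foldl,
      pvFold_add_filter]
  simp only [pvInnerLoopA_eq_any]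
  rfl

-- B SIDE: membership in the accumulated set.

theorem pvScanPathB_mem (pl : String) (markers : List String) (found : PySem.Set String) (m : String) :
    m ∈ pvScanPathB pl markers found ↔ m ∈ found ∨ (m ∈ markers ∧ PySem.Str.isIn m pl = true) := by
  induction markers generalizing found with
  | nil => simp [pvScanPathB]
  | cons a rest ih =>
    simp only [pvScanPathB, List.foldl_cons] at *
    by_cases hc : PySem.Set.contains found a = true
    · have ha : a ∈ found := (PySem.Set.contains_iff found a).mp hc
      rw [if_neg (by rw [hc, Bool.not_true, Bool.false_and]; exact Bool.false_ne_true), ih]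
      constructor
      · rintro (h | ⟨h1, h2⟩)
        · exact Or.inl h
        · exact Or.inr ⟨List.mem_cons_of_mem _ h1, h2⟩
      · rintro (h | ⟨h1, h2⟩)
        · exact Or.inl h
        · rcases List.mem_cons.mp h1 with rfl | h1
          · exact Or.inl ha
          · exact Or.inr ⟨h1, h2⟩
    · have hc' : PySem.Set.contains found a = false := Bool.eq_false_iff.mpr hc
      by_cases hi : PySem.Str.isIn a pl = true
      · rw [if_pos (by rw [hc', hi]; rfl), ih]
        simp only [PySem.Set.mem_add, List.mem_cons]
        constructor
        · rintro ((h | rfl) | ⟨h1, h2⟩)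
          · exact Or.inl h
          · exact Or.inr ⟨Or.inl rfl, hi⟩
          · exact Or.inr ⟨Or.inr h1, h2⟩
        · rintro (h | ⟨(rfl | h1), h2⟩)
          · exact Or.inl (Or.inl h)
          · exact Or.inl (Or.inr rfl)
          · exact Or.inr ⟨h1, h2⟩
      · have hi' : PySem.Str.isIn a pl = false := Bool.eq_false_iff.mpr hi
        rw [if_neg (by rw [hi', Bool.and_false]; exact Bool.false_ne_true), ih]
        constructor
        · rintro (h | ⟨h1, h2⟩)
          · exact Or.inl h
          · exact Or.inr ⟨List.mem_cons_of_mem _ h1, h2⟩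
        · rintro (h | ⟨h1, h2⟩)
          · exact Or.inl h
          · rcases List.mem_cons.mp h1 with rfl | h1
            · exact absurd h2 hi
            · exact Or.inr ⟨h1, h2⟩

theorem pvScanPathB_subset (pl : String) (markers : List String) (found : PySem.Set String)
    (h : ∀ x ∈ found, x ∈ markers) : ∀ x ∈ pvScanPathB pl markers found, x ∈ markers := by
  intro x hx
  rcases (pvScanPathB_mem pl markers found x).mp hx with h1 | ⟨h1, _⟩
  · exact h x h1
  · exact h1

theorem pvScanPathB_nodup (pl : String) (markers : List String) (found : PySem.Set String)
    (h : found.Nodup) : (pvScanPathB pl markers found).Nodup := by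
  induction markers generalizing found with
  | nil => exact h
  | cons a rest ih =>
    simp only [pvScanPathB, List.foldl_cons] at *
    split
    · exact ih _ (PySem.Set.nodup_add _ _ h)
    · exact ih _ h

theorem pvSubset_rev {α : Type} [DecidableEq α] (l1 l2 : List α) (h1 : l1.Nodup)
    (hsub : ∀ x ∈ l1, x ∈ l2) (hlen : l2.length ≤ l1.length) : ∀ x ∈ l2, x ∈ l1 := by
  have hf : l1.toFinset ⊆ l2.toFinset := by
    intro x hx; simp only [List.mem_toFinset] at hx ⊢; exact hsub x hx
  have hc : l2.toFinset.card ≤ l1.toFinset.card := by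
    calc l2.toFinset.card ≤ l2.length := l2.toFinset_card_le
      _ ≤ l1.length := hlen
      _ = l1.toFinset.card := (List.toFinset_card_of_nodup h1).symm
  have heq := Finset.eq_of_subset_of_card_le hf hc
  intro x hx
  have : x ∈ l1.toFinset := by rw [heq]; simpa using hx
  simpa using this

theorem pvLoopB_mem (markers : List String) (ps : List String)
    (found : PySem.Set String) (hn : found.Nodup) (hs : ∀ x ∈ found, x ∈ markers) (m : String) :
    m ∈ pvLoopB markers ps found
      ↔ m ∈ found ∨ (m ∈ markers ∧ ps.any (fun p => PySem.Str.isIn m (PySem.Str.lower p)) = true) := by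
  induction ps generalizing found with
  | nil => simp [pvLoopB]
  | cons p rest ih =>
    simp only [pvLoopB]
    by_cases hlen : (found.length == markers.length) = true
    · rw [if_pos hlen]
      have hrev := pvSubset_rev found markers hn hs (Nat.le_of_eq (Eq.symm (by simpa using hlen)))
      constructor
      · exact Or.inl
      · rintro (h | ⟨h1, _⟩)
        · exact h
        · exact hrev m h1
    · rw [if_neg hlen]
      rw [ih _ (pvScanPathB_nodup _ _ _ hn) (pvScanPathB_subset _ _ _ hs)]
      rw [pvScanPathB_mem]
      simp only [List.any_cons, Bool.or_eq_true]
      tauto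

-- ===== VERDICT (by name: the statement is the Claim_ definition above) =====
theorem extract_item_family_codes_py_spec : Claim_equal_extract_item_family_codes_py := by
  intro paths known_codes _
  show extract_item_family_codes_py paths known_codes = extract_item_family_codes_py_alt paths known_codes
  rw [pvA_char]
  unfold extract_item_family_codes_py_alt
  dsimp only
  apply List.filter_congr
  intro c hc
  have hmem : ("_" ++ PySem.Str.lower c ++ "_")
      ∈ PySem.List.dedup (known_codes.map (fun c => "_" ++ PySem.Str.lower c ++ "_")) := by
    rw [PySem.List.dedup_eq_ofList, PySem.Set.mem_ofList]
    exact List.mem_map_of_mem (by simpa using hc)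
  rw [show (PySem.Set.empty : PySem.Set String) = ([] : List String) from rfl]
  rw [Bool.eq_iff_iff, PySem.Set.contains_iff]
  rw [pvLoopB_mem _ _ _ (List.nodup_nil) (by simp) _]
  constructor
  · intro h; exact Or.inr ⟨hmem, h⟩
  · rintro (h | ⟨_, h⟩)
    · cases h
    · exact h
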